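-- pv_equiv track=rewrite | github.com/HaiCuCai-00/OCR_v1 | modules/post_processing/text_process.py | split_with_idx
-- ===== SOURCE A (Python) =====
-- def split_with_idx(s):
--     list_s = []
--     list_idx = []
--
--     new_word = ""
--     for i, c in enumerate(s + " "):
--         if c != " ":
--             new_word += c
--         elif new_word != "":
--             list_s.append(new_word)
--             list_idx.append(i - len(new_word))
--             new_word = ""
--
--     return list_s, list_idx
-- ===== SOURCE B (Python) =====
-- def split_with_idx(s):
--     list_s = []
--     list_idx = []
--     i = 0
--     n = len(s)
--     while i < n:
--         if s[i] == ' ':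
--             i += 1
--         else:
--             j = i
--             while j < n and s[j] != ' ':
--                 j += 1
--             list_s.append(s[i:j])
--             list_idx.append(i)
--             i = j
--     return list_s, list_idx
-- ===== Notes on version B (the rewrite author's own statement) =====
-- stated objective: alternative
-- what changed: Replaces A's char-by-char accumulation of each word over an enumeration of the sentinel-padded string with a two-pointer index scan over s that finds the end of each maximal non-space run and slices it out in one step.
import Mathlib
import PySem

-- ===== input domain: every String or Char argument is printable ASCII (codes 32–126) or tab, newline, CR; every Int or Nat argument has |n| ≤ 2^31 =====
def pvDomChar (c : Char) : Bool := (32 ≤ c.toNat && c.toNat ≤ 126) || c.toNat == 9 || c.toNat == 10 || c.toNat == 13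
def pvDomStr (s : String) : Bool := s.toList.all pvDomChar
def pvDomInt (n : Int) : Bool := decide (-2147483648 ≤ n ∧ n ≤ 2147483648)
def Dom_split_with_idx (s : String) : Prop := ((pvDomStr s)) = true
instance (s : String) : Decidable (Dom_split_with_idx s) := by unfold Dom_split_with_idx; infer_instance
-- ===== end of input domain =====

-- B replaces A's char-by-char word accumulation over the sentinel-padded string with a two-pointer
-- index scan over s that slices out each maximal run of non-space characters (objective: alternative).


-- ===== PORT A =====
-- the loop body of A: state is (list_s, list_idx, new_word); new_word kept as List Char
def stepA (st : List String × List Int × List Char) (p : Int × Char) :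
    List String × List Int × List Char :=
  if p.2 ≠ ' ' then (st.1, st.2.1, st.2.2 ++ [p.2])
  else if st.2.2 ≠ [] then
    (st.1 ++ [String.ofList st.2.2], st.2.1 ++ [p.1 - (st.2.2.length : Int)], [])
  else st

def split_with_idx (s : String) : List String × List Int :=
  let r := (PySem.List.enumerate (s.toList ++ [' ']) 0).foldl stepA ([], [], [])
  (r.1, r.2.1)

-- ===== PORT B =====
-- B's outer while loop; the inner `while j < n and s[j] != ' '` / slice s[i:j] is the
-- takeWhile/dropWhile span of the non-space run
def altGo (cs : List Char) (i : Int) : List String × List Int :=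
  match cs with
  | [] => ([], [])
  | c :: rest =>
    if _hc : c = ' ' then altGo rest (i + 1)
    else
      let w := (c :: rest).takeWhile (· ≠ ' ')
      let r := (c :: rest).dropWhile (· ≠ ' ')
      let p := altGo r (i + (w.length : Int))
      (String.ofList w :: p.1, i :: p.2)
termination_by cs.length
decreasing_by
  · simp
  · simp only [List.dropWhile_cons]
    split
    · have := List.length_dropWhile_le (fun x => decide (x ≠ ' ')) rest
      simp only [List.length_cons]
      omega
    · simp_all

def split_with_idx_alt (s : String) : List String × List Int := altGo s.toList 0

-- ===== PRECONDITION & SPEC =====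
def Spec_split_with_idx (s : String) (out : List String × List Int) : Prop := out = split_with_idx_alt s
instance (s : String) (out : List String × List Int) : Decidable (Spec_split_with_idx s out) := by unfold Spec_split_with_idx; infer_instance

-- ===== CLAIM (what is proved, stated in full; the proofs are below) =====
def Claim_equal_split_with_idx : Prop := ∀ (s : String), Dom_split_with_idx s → Spec_split_with_idx s (split_with_idx s)

-- ===== LEMMAS AND PROOFS =====

-- head of a non-empty dropWhile fails the predicate
theorem dropWhile_head_false (p : Char → Bool) :
    ∀ (l : List Char) (d : Char) (r : List Char), l.dropWhile p = d :: r → p d = false := by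
  intro l
  induction l with
  | nil => intro d r h; simp at h
  | cons a l ih =>
    intro d r h
    rw [List.dropWhile_cons] at h
    split at h
    · exact ih _ _ h
    · cases h; simpa using ‹¬ p a = true›

-- accumulation phase: folding stepA over a run of non-space chars just appends them to the word
theorem accum (t : List Char) (ht : ∀ a ∈ t, a ≠ ' ') :
    ∀ (rest : List Char) (i : Int) (ls : List String) (li : List Int) (w : List Char),
    (PySem.List.enumerate (t ++ rest) i).foldl stepA (ls, li, w)
      = (PySem.List.enumerate rest (i + (t.length : Int))).foldl stepA (ls, li, w ++ t) := by
  induction t with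
  | nil => intro rest i ls li w; simp
  | cons a t ih =>
    intro rest i ls li w
    have ha : a ≠ ' ' := ht a (by simp)
    simp only [List.cons_append, PySem.List.enumerate_cons, List.foldl_cons]
    rw [show stepA (ls, li, w) (i, a) = (ls, li, w ++ [a]) by simp [stepA, ha]]
    rw [ih (fun a h => ht a (by simp [h]))]
    have : i + 1 + (t.length : Int) = i + ((a :: t).length : Int) := by
      simp only [List.length_cons]; push_cast; ring
    rw [this, List.append_assoc]
    rfl

theorem main_lemma (n : Nat) :
    ∀ (cs : List Char), cs.length ≤ n → ∀ (i : Int) (ls : List String) (li : List Int),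
    (PySem.List.enumerate (cs ++ [' ']) i).foldl stepA (ls, li, [])
      = (ls ++ (altGo cs i).1, li ++ (altGo cs i).2, ([] : List Char)) := by
  induction n with
  | zero =>
    intro cs hlen i ls li
    have hcs : cs = [] := List.eq_nil_of_length_eq_zero (Nat.le_zero.mp hlen)
    subst hcs
    simp [altGo, PySem.List.enumerate, stepA]
  | succ n ih =>
    intro cs hlen i ls li
    match cs with
    | [] => simp [altGo, PySem.List.enumerate, stepA]
    | c :: rest =>
      by_cases hc : c = ' '
      · subst hc
        simp only [List.cons_append, PySem.List.enumerate_cons, List.foldl_cons]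
        rw [show stepA (ls, li, []) (i, ' ') = (ls, li, []) by simp [stepA]]
        rw [ih rest (by simpa using hlen) (i + 1) ls li]
        rw [show altGo (' ' :: rest) i = altGo rest (i + 1) by simp [altGo]]
      · -- non-space head: split cs into the run (c :: t0) and the remainder
        set t0 := rest.takeWhile (· ≠ ' ') with ht0
        have htall : ∀ a ∈ (c :: t0), a ≠ ' ' := by
          intro a ha
          rcases List.mem_cons.mp ha with h | h
          · subst h; exact hc
          · have := List.mem_takeWhile_imp (ht0 ▸ h)
            simpa using this
        have haltcs : altGo (c :: rest) i =
            (String.ofList (c :: t0) :: (altGo (rest.dropWhile (· ≠ ' ')) (i + ((c :: t0).length : Int))).1,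
             i :: (altGo (rest.dropWhile (· ≠ ' ')) (i + ((c :: t0).length : Int))).2) := by
          conv_lhs => rw [altGo]
          simp only [hc, dite_false, List.takeWhile_cons, List.dropWhile_cons]
          simp [ht0, hc]
        match hrc : rest.dropWhile (· ≠ ' ') with
        | [] =>
          have hsplit : rest = t0 := by
            conv_lhs => rw [← List.takeWhile_append_dropWhile (p := (· ≠ ' ')) (l := rest)]
            rw [hrc]; simp [ht0]
          have hacc := accum (c :: t0) htall [' '] i ls li []
          rw [show (c :: rest) ++ [' '] = (c :: t0) ++ [' '] by simp [hsplit], hacc]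
          simp only [List.nil_append, PySem.List.enumerate_cons, PySem.List.enumerate_nil,
            List.foldl_cons, List.foldl_nil]
          rw [show stepA (ls, li, c :: t0) (i + ((c :: t0).length : Int), ' ')
              = (ls ++ [String.ofList (c :: t0)], li ++ [i], []) by simp [stepA]]
          rw [haltcs, hrc]
          simp [altGo]
        | d :: r' =>
          have hd : d = ' ' := by
            have := dropWhile_head_false (fun x => decide (x ≠ ' ')) rest d r' hrc
            simpa using this
          subst hd
          have hsplit : rest = t0 ++ ' ' :: r' := by
            conv_lhs => rw [← List.takeWhile_append_dropWhile (p := (· ≠ ' ')) (l := rest)]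
            rw [hrc]
          have hacc := accum (c :: t0) htall (' ' :: r' ++ [' ']) i ls li []
          rw [show (c :: rest) ++ [' '] = (c :: t0) ++ (' ' :: r' ++ [' ']) by simp [hsplit], hacc]
          simp only [List.nil_append, List.cons_append, PySem.List.enumerate_cons, List.foldl_cons]
          rw [show stepA (ls, li, c :: t0) (i + ((c :: t0).length : Int), ' ')
              = (ls ++ [String.ofList (c :: t0)], li ++ [i], []) by simp [stepA]]
          have hr'len : r'.length ≤ n := by
            have h1 : (' ' :: r').length ≤ rest.length := by
              rw [← hrc]; exact List.length_dropWhile_le _ _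
            simp only [List.length_cons] at h1 hlen
            omega
          rw [ih r' hr'len (i + ((c :: t0).length : Int) + 1) _ _]
          rw [haltcs, hrc]
          rw [show altGo (' ' :: r') (i + ((c :: t0).length : Int))
              = altGo r' (i + ((c :: t0).length : Int) + 1) by simp [altGo]]
          simp

-- ===== VERDICT (by name: the statement is the Claim_ definition above) =====
theorem split_with_idx_spec : Claim_equal_split_with_idx := by
  intro s _
  unfold Spec_split_with_idx split_with_idx split_with_idx_alt
  rw [main_lemma s.toList.length s.toList le_rfl 0 [] []]
  simp
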